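-- pv_equiv track=rewrite | github.com/spbgithub/projecteuler | pe129_try1.py | pad_prime_list
-- ===== SOURCE A (Python) =====
-- BOUND = 1000000
--
-- def pad_prime_list(l, p):
-- 	lm = l[-1][0]
-- 	n  = l[-1][1]
-- 	while n < BOUND:
-- 		l.append((lm*p, n*p))
-- 		lm = l[-1][0]
-- 		n  = l[-1][1]
-- 	l.append((lm*p, n*p))
-- 	return l
-- ===== SOURCE B (Python) =====
-- BOUND = 1000000
--
-- def pad_prime_list(l, p):
--     lm0, n0 = l[-1]
--     k = 0
--     cur = n0
--     while cur < BOUND: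
--         cur *= p
--         k += 1
--     l.extend((lm0 * p**i, n0 * p**i) for i in range(1, k + 2))
--     return l
-- ===== Notes on version B (the rewrite author's own statement) =====
-- stated objective: alternative
-- what changed: B first counts how many multiplications k bring the last n to BOUND (an integer count loop), then generates and appends all k+1 tuples directly from the base pair as (lm0*p**i, n0*p**i), instead of A's loop that repeatedly re-reads l[-1] and appends one tuple at a time.
import Mathlib
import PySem

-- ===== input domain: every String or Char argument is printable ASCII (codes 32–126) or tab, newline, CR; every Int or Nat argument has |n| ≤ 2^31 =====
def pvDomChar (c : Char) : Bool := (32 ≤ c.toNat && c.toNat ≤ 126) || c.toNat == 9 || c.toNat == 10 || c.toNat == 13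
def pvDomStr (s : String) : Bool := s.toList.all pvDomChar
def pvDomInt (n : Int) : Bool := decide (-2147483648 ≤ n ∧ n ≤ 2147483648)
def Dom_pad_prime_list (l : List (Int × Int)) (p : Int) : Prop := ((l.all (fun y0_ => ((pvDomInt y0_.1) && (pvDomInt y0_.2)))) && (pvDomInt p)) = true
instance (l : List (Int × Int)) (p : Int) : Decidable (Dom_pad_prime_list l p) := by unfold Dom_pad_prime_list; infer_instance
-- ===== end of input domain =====

-- B splits the work into a count phase and a generation phase from the base pair, instead of
-- A's append loop that re-reads l[-1]; objective: alternative (not faster). Both Pythons mutate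
-- l in place with the same appended tuples, so the in-place effect agrees too.

-- ===== PORT A =====
-- A's while loop; the Nat fuel only makes the recursion total (64 is enough on every input
-- admitted by Pre_, proved below); on fuel exhaustion it returns the accumulator (unreachable under Pre_).
def padLoopA (fuel : Nat) (acc : List (Int × Int)) (lm n p : Int) : List (Int × Int) :=
  match fuel with
  | 0 => acc
  | fuel + 1 =>
    if n < 1000000 then
      padLoopA fuel (acc ++ [(lm * p, n * p)]) (lm * p) (n * p) p
    else
      acc ++ [(lm * p, n * p)]

def pad_prime_list (l : List (Int × Int)) (p : Int) : List (Int × Int) :=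
  match PySem.List.pyGet? l (-1) with
  | none => []          -- l[-1] raises IndexError: excluded by Pre_
  | some (lm, n) => padLoopA 64 l lm n p

-- ===== PORT B =====
-- B's count loop (while cur < BOUND: cur *= p; k += 1); same fuel-totality guard, none = fuel exhausted.
def countK (fuel : Nat) (cur p : Int) : Option Nat :=
  match fuel with
  | 0 => none
  | fuel + 1 =>
    if cur < 1000000 then (countK fuel (cur * p) p).map (· + 1)
    else some 0

def pad_prime_list_alt (l : List (Int × Int)) (p : Int) : List (Int × Int) :=
  match PySem.List.pyGet? l (-1) with
  | none => []          -- l[-1] raises IndexError: excluded by Pre_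
  | some (lm0, n0) =>
    let k := (countK 64 n0 p).getD 0
    l ++ (List.range (k + 1)).map (fun i => (lm0 * p ^ (i + 1), n0 * p ^ (i + 1)))

-- ===== PRECONDITION & SPEC =====
-- Pre_ excludes exactly the inputs where the Python A does not return: the empty list (IndexError)
-- and the inputs on which A's while loop never terminates (last n < BOUND with p in {-1,0,1} unless
-- p = -1 and n ≤ -BOUND, or n ≤ 0 with p ≥ 2, or n = 0 with p ≤ -2).
def Pre_pad_prime_list (l : List (Int × Int)) (p : Int) : Prop :=
  l ≠ [] ∧
    (let n := (l.getLastD (0, 0)).2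
     1000000 ≤ n ∨ (1 ≤ n ∧ 2 ≤ p) ∨ (p ≤ -2 ∧ n ≠ 0) ∨ (p = -1 ∧ n ≤ -1000000))
instance (l : List (Int × Int)) (p : Int) : Decidable (Pre_pad_prime_list l p) := by
  unfold Pre_pad_prime_list; infer_instance

def pvWitness_pad_prime_list : (List (Int × Int)) × Int := ([(1, 999999)], 2)

def Spec_pad_prime_list (l : List (Int × Int)) (p : Int) (out : List (Int × Int)) : Prop := out = pad_prime_list_alt l p
instance (l : List (Int × Int)) (p : Int) (out : List (Int × Int)) : Decidable (Spec_pad_prime_list l p out) := by unfold Spec_pad_prime_list; infer_instance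

-- ===== CLAIM (what is proved, stated in full; the proofs are below) =====
def Claim_equal_pad_prime_list : Prop := ∀ (l : List (Int × Int)) (p : Int), Dom_pad_prime_list l p → Pre_pad_prime_list l p → Spec_pad_prime_list l p (pad_prime_list l p)

-- ===== LEMMAS AND PROOFS =====

-- Shifting the base by one factor of p shifts the generated power list by one position.
theorem cons_map_powers (lm n p : Int) (k : Nat) :
    (lm * p, n * p)
        :: List.map (fun i => (lm * p * p ^ (i + 1), n * p * p ^ (i + 1))) (List.range (k + 1))
      = List.map (fun i => (lm * p ^ (i + 1), n * p ^ (i + 1))) (List.range (k + 1 + 1)) := by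
  conv_rhs => rw [List.range_succ_eq_map]
  rw [List.map_cons, List.map_map]
  congr 1
  · simp
  · apply List.map_congr_left
    intro i _
    simp only [Function.comp, Prod.mk.injEq, Nat.succ_eq_add_one, pow_succ]
    constructor <;> ring

-- A's loop equals the base-and-powers generation, whenever the count loop finishes within the fuel.
theorem padLoopA_eq_powers (fuel : Nat) :
    ∀ (acc : List (Int × Int)) (lm n p : Int) (k : Nat),
      countK fuel n p = some k →
      padLoopA fuel acc lm n p
        = acc ++ (List.range (k + 1)).map (fun i => (lm * p ^ (i + 1), n * p ^ (i + 1))) := by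
  induction fuel with
  | zero => intro acc lm n p k h; simp [countK] at h
  | succ f ih =>
    intro acc lm n p k h
    by_cases hn : n < 1000000
    · simp only [countK, if_pos hn, Option.map_eq_some_iff] at h
      obtain ⟨k', hk', rfl⟩ := h
      rw [padLoopA, if_pos hn, ih _ _ _ _ _ hk', List.append_assoc, List.singleton_append,
        cons_map_powers]
    · simp only [countK, if_neg hn] at h
      obtain rfl : (0 : Nat) = k := Option.some.inj h
      rw [padLoopA, if_neg hn]
      simp [List.range_succ]

-- Fuel sufficiency, growth case: p ≥ 2, n ≥ 1.
theorem countK_pos (f : Nat) :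
    ∀ n p : Int, 2 ≤ p → 1 ≤ n → 1000000 ≤ n * 2 ^ f → (countK (f + 1) n p).isSome := by
  induction f with
  | zero =>
    intro n p hp hn h
    simp only [pow_zero, mul_one] at h
    simp [countK, not_lt.mpr h]
  | succ f ih =>
    intro n p hp hn h
    by_cases hlt : n < 1000000
    · have h1 : 1 ≤ n * p := one_le_mul_of_one_le_of_one_le hn (by omega)
      have h2 : 1000000 ≤ n * p * 2 ^ f := by
        have : n * 2 * 2 ^ f ≤ n * p * 2 ^ f := by
          apply mul_le_mul_of_nonneg_right (by nlinarith) (by positivity)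
        calc (1000000 : Int) ≤ n * 2 ^ (f + 1) := h
          _ = n * 2 * 2 ^ f := by ring
          _ ≤ n * p * 2 ^ f := this
      have := ih (n * p) p hp h1 h2
      rw [countK, if_pos hlt, Option.isSome_map]
      exact this
    · simp [countK, hlt]

-- Fuel sufficiency, alternating case: p ≤ -2, n ≠ 0 (measured by |n|, which doubles each step;
-- two extra fuel units cover the final sign flip).
theorem countK_neg (f : Nat) :
    ∀ n p : Int, p ≤ -2 → n ≠ 0 → 1000000 ≤ |n| * 2 ^ f → (countK (f + 2) n p).isSome := by
  induction f with
  | zero =>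
    intro n p hp hn h
    simp only [pow_zero, mul_one] at h
    by_cases hlt : n < 1000000
    · have hneg : n ≤ -1000000 := by
        rcases abs_cases n with ⟨he, _⟩ | ⟨he, _⟩ <;> omega
      have hbig : ¬ n * p < 1000000 := by nlinarith
      simp [countK, if_pos hlt, hbig]
    · simp [countK, hlt]
  | succ f ih =>
    intro n p hp hn h
    by_cases hlt : n < 1000000
    · have hn' : n * p ≠ 0 := mul_ne_zero hn (by omega)
      have h2 : 1000000 ≤ |n * p| * 2 ^ f := by
        rw [abs_mul]
        have hp2 : (2 : Int) ≤ |p| := by rcases abs_cases p with ⟨he, _⟩ | ⟨he, _⟩ <;> omega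
        have : |n| * 2 * 2 ^ f ≤ |n| * |p| * 2 ^ f := by
          apply mul_le_mul_of_nonneg_right
            (mul_le_mul_of_nonneg_left hp2 (abs_nonneg n)) (by positivity)
        calc (1000000 : Int) ≤ |n| * 2 ^ (f + 1) := h
          _ = |n| * 2 * 2 ^ f := by ring
          _ ≤ |n| * |p| * 2 ^ f := this
      have := ih (n * p) p hp hn' h2
      rw [countK, if_pos hlt, Option.isSome_map]
      exact this
    · simp [countK, hlt]

-- Under Pre_, the count loop finishes within fuel 64.
theorem countK_total (n p : Int)
    (h : 1000000 ≤ n ∨ (1 ≤ n ∧ 2 ≤ p) ∨ (p ≤ -2 ∧ n ≠ 0) ∨ (p = -1 ∧ n ≤ -1000000)) :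
    (countK 64 n p).isSome := by
  rcases h with h | ⟨h1, h2⟩ | ⟨h1, h2⟩ | ⟨h1, h2⟩
  · simp [countK, not_lt.mpr h]
  · have : 1000000 ≤ n * 2 ^ 63 := by nlinarith [pow_pos (by norm_num : (0:Int) < 2) 63, (by norm_num : (1000000 : Int) ≤ 2 ^ 63)]
    exact countK_pos 63 n p h2 h1 this
  · have h3 : (1 : Int) ≤ |n| := by rcases abs_cases n with ⟨he, _⟩ | ⟨he, _⟩ <;> omega
    have : 1000000 ≤ |n| * 2 ^ 62 := by nlinarith [(by norm_num : (1000000 : Int) ≤ 2 ^ 62)]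
    exact countK_neg 62 n p h1 h2 this
  · subst h1
    have hlt : n < 1000000 := by omega
    have hbig : ¬ n * (-1) < 1000000 := by omega
    rw [show (64 : Nat) = 63 + 1 from rfl, countK, if_pos hlt,
      show (63 : Nat) = 62 + 1 from rfl, countK, if_neg hbig]
    rfl

-- ===== VERDICT (by name: the statement is the Claim_ definition above) =====
theorem pad_prime_list_spec : Claim_equal_pad_prime_list := by
  intro l p _hdom hpre
  obtain ⟨hne, hcond⟩ := hpre
  simp only [Spec_pad_prime_list]
  unfold pad_prime_list pad_prime_list_alt
  rw [PySem.List.pyGet?_neg_one]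
  obtain ⟨q, hq⟩ := Option.ne_none_iff_exists'.mp (mt List.getLast?_eq_none_iff.mp hne)
  rw [hq]
  obtain ⟨lm, n⟩ := q
  dsimp only
  have hlast : (l.getLastD (0, 0)).2 = n := by
    simp [List.getLastD_eq_getLast?, hq]
  rw [hlast] at hcond
  obtain ⟨k, hk⟩ := Option.isSome_iff_exists.mp (countK_total n p hcond)
  rw [padLoopA_eq_powers 64 l lm n p k hk, hk]
  rfl
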